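-- pv_equiv track=rewrite | github.com/tharusha-pathirana/swin-semantic-communication | adaptive_functions.py | sort_patches_by_morton
-- ===== SOURCE A (Python) =====
-- def interleave_bits(n):
--     """Helper to interleave bits of a 16-bit integer."""
--     n &= 0xFFFF
--     n = (n | (n << 8)) & 0x00FF00FF
--     n = (n | (n << 4)) & 0x0F0F0F0F
--     n = (n | (n << 2)) & 0x33333333
--     n = (n | (n << 1)) & 0x55555555
--     return n
--
-- def morton_code(x, y):
--     """
--     Computes the Morton code (Z-order) for the (x, y) coordinates.
--     Here we interleave the bits of x and y.
--     """
--     return (interleave_bits(y) << 1) | interleave_bits(x)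
--
-- def sort_patches_by_morton(patches):
--     """
--     Sorts a list of patch coordinates (x, y, w, h) using the Morton Z-order.
--     We compute the Morton code based on the patch’s center.
--     """
--     patches_with_code = []
--     for (x, y, w, h) in patches:
--         center_x = x + w // 2
--         center_y = y + h // 2
--         code = morton_code(center_x, center_y)
--         patches_with_code.append(((x, y, w, h), code))
--     patches_with_code.sort(key=lambda item: item[1])
--     sorted_patches = [item[0] for item in patches_with_code]
--     return sorted_patches
-- ===== SOURCE B (Python) =====
-- def sort_patches_by_morton(patches):
--     """Sort patches (x, y, w, h) by the Morton Z-order code of their centers."""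
--     def interleave(n):
--         n &= 0xFFFF
--         r = 0
--         for i in range(16):
--             r |= ((n >> i) & 1) << (2 * i)
--         return r
--     return sorted(patches,
--                   key=lambda p: (interleave(p[1] + p[3] // 2) << 1)
--                                 | interleave(p[0] + p[2] // 2))
-- ===== Notes on version B (the rewrite author's own statement) =====
-- stated objective: idiomatic
-- what changed: Replaces the decorate-sort-undecorate list building with a single sorted(key=...) call and replaces the magic-mask parallel bit-spreading in interleave_bits by an explicit per-bit loop that ORs bit i of the 16-bit-masked coordinate into position 2*i of an accumulator.
import Mathlib
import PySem

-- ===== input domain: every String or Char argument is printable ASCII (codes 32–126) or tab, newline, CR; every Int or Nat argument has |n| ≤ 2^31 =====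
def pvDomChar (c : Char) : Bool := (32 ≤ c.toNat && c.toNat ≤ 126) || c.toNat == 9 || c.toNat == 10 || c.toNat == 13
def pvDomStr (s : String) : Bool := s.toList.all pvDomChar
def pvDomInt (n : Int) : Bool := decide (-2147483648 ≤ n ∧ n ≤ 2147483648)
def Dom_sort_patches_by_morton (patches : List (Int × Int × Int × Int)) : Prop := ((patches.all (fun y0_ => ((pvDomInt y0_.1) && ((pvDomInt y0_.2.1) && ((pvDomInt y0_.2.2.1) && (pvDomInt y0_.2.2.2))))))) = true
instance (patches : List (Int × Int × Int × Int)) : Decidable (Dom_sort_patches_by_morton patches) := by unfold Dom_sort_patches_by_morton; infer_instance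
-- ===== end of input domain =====

-- B replaces A's decorate-sort-undecorate with a single sorted-by-key pass and replaces the
-- magic-mask parallel bit spreading by an explicit per-bit loop (objective: idiomatic).

-- ===== PORT A =====
def interleave_bits (n : Int) : Int :=
  let n := PySem.Int.band n 0xFFFF
  let n := PySem.Int.band (PySem.Int.bor n (n <<< (8 : Nat))) 0x00FF00FF
  let n := PySem.Int.band (PySem.Int.bor n (n <<< (4 : Nat))) 0x0F0F0F0F
  let n := PySem.Int.band (PySem.Int.bor n (n <<< (2 : Nat))) 0x33333333
  let n := PySem.Int.band (PySem.Int.bor n (n <<< (1 : Nat))) 0x55555555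
  n

def morton_code (x y : Int) : Int :=
  PySem.Int.bor (interleave_bits y <<< (1 : Nat)) (interleave_bits x)

def sort_patches_by_morton (patches : List (Int × Int × Int × Int)) : List (Int × Int × Int × Int) :=
  let patches_with_code := patches.foldl
    (fun acc p =>
      acc ++ [(p, morton_code (p.1 + PySem.Int.floordiv p.2.2.1 2)
                              (p.2.1 + PySem.Int.floordiv p.2.2.2 2))]) []
  (PySem.List.sorted patches_with_code (fun item => item.2) false).map (fun item => item.1)

-- ===== PORT B =====
-- range(16) is ported as List.range 16: the loop indices 0,…,15 are the (Nat) shift amounts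
def interleave_alt (n : Int) : Int :=
  let v := PySem.Int.band n 0xFFFF
  (List.range 16).foldl
    (fun (r : Int) (i : Nat) => PySem.Int.bor r ((PySem.Int.band (v >>> i) 1) <<< (2 * i))) 0

def morton_key_alt (p : Int × Int × Int × Int) : Int :=
  PySem.Int.bor (interleave_alt (p.2.1 + PySem.Int.floordiv p.2.2.2 2) <<< (1 : Nat))
    (interleave_alt (p.1 + PySem.Int.floordiv p.2.2.1 2))

def sort_patches_by_morton_alt (patches : List (Int × Int × Int × Int)) : List (Int × Int × Int × Int) :=
  PySem.List.sorted patches morton_key_alt false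

-- ===== PRECONDITION & SPEC =====
def Spec_sort_patches_by_morton (patches : List (Int × Int × Int × Int)) (out : List (Int × Int × Int × Int)) : Prop := out = sort_patches_by_morton_alt patches
instance (patches : List (Int × Int × Int × Int)) (out : List (Int × Int × Int × Int)) : Decidable (Spec_sort_patches_by_morton patches out) := by unfold Spec_sort_patches_by_morton; infer_instance

-- ===== CLAIM (what is proved, stated in full; the proofs are below) =====
def Claim_equal_sort_patches_by_morton : Prop := ∀ (patches : List (Int × Int × Int × Int)), Dom_sort_patches_by_morton patches → Spec_sort_patches_by_morton patches (sort_patches_by_morton patches)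

-- ===== LEMMAS AND PROOFS =====

-- Nat-level counterparts of the two bit-interleaving routines (used only in the proofs)
def magicN (m : Nat) : Nat :=
  let n := (m ||| (m <<< 8)) &&& 0x00FF00FF
  let n := (n ||| (n <<< 4)) &&& 0x0F0F0F0F
  let n := (n ||| (n <<< 2)) &&& 0x33333333
  let n := (n ||| (n <<< 1)) &&& 0x55555555
  n

def loopN (m : Nat) : Nat :=
  (List.range 16).foldl (fun r i => r ||| (((m >>> i) &&& 1) <<< (2 * i))) 0

theorem loop_bound (m : Nat) : ∀ (L : List Nat) (r : Nat), r < 2 ^ 32 → (∀ i ∈ L, i < 16) →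
    L.foldl (fun r i => r ||| (((m >>> i) &&& 1) <<< (2 * i))) r < 2 ^ 32 := by
  intro L
  induction L with
  | nil => intro r hr _; simpa using hr
  | cons a L ih =>
    intro r hr hmem
    simp only [List.foldl_cons]
    apply ih
    · apply Nat.or_lt_two_pow hr
      have h1 : (m >>> a) &&& 1 < 2 ^ 1 := Nat.and_lt_two_pow _ (by norm_num)
      have h2 := Nat.shiftLeft_lt (m := 2 * a) h1
      exact lt_of_lt_of_le h2 (Nat.pow_le_pow_right (by norm_num)
        (by have := hmem a List.mem_cons_self; omega))
    · intro i hi; exact hmem i (List.mem_cons_of_mem _ hi)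

set_option maxHeartbeats 1000000 in
theorem magic_eq_loop (m : Nat) (hm : m < 65536) : magicN m = loopN m := by
  apply Nat.eq_of_testBit_eq
  intro k
  by_cases hk : k < 32
  · interval_cases k <;>
      · simp [magicN, loopN, List.range_succ, Nat.testBit_shiftLeft]
        try simp [Nat.testBit_eq_decide_div_mod_eq, Nat.shiftRight_eq_div_pow]
        try rw [Bool.eq_iff_iff]
        try simp only [Bool.or_eq_true, decide_eq_true_eq]
        try omega
  · have h1 : magicN m < 2 ^ 32 := Nat.and_lt_two_pow _ (by norm_num)
    have h2 : loopN m < 2 ^ 32 := loop_bound m (List.range 16) 0 (by norm_num)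
      (fun i hi => List.mem_range.mp hi)
    have e1 : 2 ^ 32 ≤ 2 ^ k := Nat.pow_le_pow_right (by norm_num) (by omega)
    rw [Nat.testBit_eq_false_of_lt (lt_of_lt_of_le h1 e1),
        Nat.testBit_eq_false_of_lt (lt_of_lt_of_le h2 e1)]

theorem band_mask_bounds (n : Int) :
    0 ≤ PySem.Int.band n 65535 ∧ PySem.Int.band n 65535 < 65536 := by
  unfold PySem.Int.band
  split_ifs with h1 h2 h2
  · refine ⟨Int.natCast_nonneg _, ?_⟩
    have h : n.toNat &&& (65535 : Int).toNat < 65536 :=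
      lt_of_lt_of_le (Nat.and_lt_two_pow _ (show (65535 : Int).toNat < 2 ^ 16 by norm_num))
        (by norm_num)
    exact_mod_cast h
  · norm_num at h2
  · refine ⟨Int.natCast_nonneg _, ?_⟩
    have h : (65535 : Int).toNat - ((65535 : Int).toNat &&& (-n - 1).toNat) ≤ 65535 :=
      le_trans (Nat.sub_le _ _) (by norm_num)
    exact_mod_cast Nat.lt_succ_of_le h
  · norm_num at h2

theorem band_cast (a b : Nat) : PySem.Int.band (a : Int) (b : Int) = ((a &&& b : Nat) : Int) := by
  simp [PySem.Int.band]

theorem bor_cast (a b : Nat) : PySem.Int.bor (a : Int) (b : Int) = ((a ||| b : Nat) : Int) := by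
  simp [PySem.Int.bor]

theorem stage_cast (x s mask : Nat) :
    PySem.Int.band (PySem.Int.bor (x : Int) ((x : Int) <<< s)) (mask : Int)
      = (((x ||| x <<< s) &&& mask : Nat) : Int) := by
  rw [← Int.natCast_shiftLeft, bor_cast, band_cast]

theorem chainA (v : Nat) :
    PySem.Int.band (PySem.Int.bor (PySem.Int.band (PySem.Int.bor (PySem.Int.band (PySem.Int.bor (PySem.Int.band (PySem.Int.bor ((v : Int)) (((v : Int)) <<< (8 : Nat))) 16711935) ((PySem.Int.band (PySem.Int.bor ((v : Int)) (((v : Int)) <<< (8 : Nat))) 16711935) <<< (4 : Nat))) 252645135) ((PySem.Int.band (PySem.Int.bor (PySem.Int.band (PySem.Int.bor ((v : Int)) (((v : Int)) <<< (8 : Nat))) 16711935) ((PySem.Int.band (PySem.Int.bor ((v : Int)) (((v : Int)) <<< (8 : Nat))) 16711935) <<< (4 : Nat))) 252645135) <<< (2 : Nat))) 858993459) ((PySem.Int.band (PySem.Int.bor (PySem.Int.band (PySem.Int.bor (PySem.Int.band (PySem.Int.bor ((v : Int)) (((v : Int)) <<< (8 : Nat))) 16711935) ((PySem.Int.band (PySem.Int.bor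 ((v : Int)) (((v : Int)) <<< (8 : Nat))) 16711935) <<< (4 : Nat))) 252645135) ((PySem.Int.band (PySem.Int.bor (PySem.Int.band (PySem.Int.bor ((v : Int)) (((v : Int)) <<< (8 : Nat))) 16711935) ((PySem.Int.band (PySem.Int.bor ((v : Int)) (((v : Int)) <<< (8 : Nat))) 16711935) <<< (4 : Nat))) 252645135) <<< (2 : Nat))) 858993459) <<< (1 : Nat))) 1431655765 = ((magicN v : Nat) : Int) := by
  rw [show (16711935 : Int) = ((16711935 : Nat) : Int) from rfl,
    show (252645135 : Int) = ((252645135 : Nat) : Int) from rfl,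
    show (858993459 : Int) = ((858993459 : Nat) : Int) from rfl,
    show (1431655765 : Int) = ((1431655765 : Nat) : Int) from rfl,
    stage_cast, stage_cast, stage_cast, stage_cast]
  rfl

theorem interleave_A_eq (n : Int) :
    interleave_bits n = ((magicN (PySem.Int.band n 65535).toNat : Nat) : Int) := by
  have hb := band_mask_bounds n
  have hcast : PySem.Int.band n 65535 = ((PySem.Int.band n 65535).toNat : Int) :=
    (Int.toNat_of_nonneg hb.1).symm
  unfold interleave_bits
  rw [hcast]
  exact chainA (PySem.Int.band n 65535).toNat

theorem step_cast (v r a : Nat) :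
    PySem.Int.bor (r : Int) ((PySem.Int.band ((v : Int) >>> a) 1) <<< (2 * a))
      = ((r ||| (((v >>> a) &&& 1) <<< (2 * a)) : Nat) : Int) := by
  rw [show ((1 : Int)) = ((1 : Nat) : Int) by norm_num, ← Int.natCast_shiftRight,
    band_cast, ← Int.natCast_shiftLeft, bor_cast]

theorem foldl_cast (v : Nat) : ∀ (L : List Nat) (r : Nat),
    List.foldl (fun (r : Int) (i : Nat) =>
        PySem.Int.bor r ((PySem.Int.band ((v : Int) >>> i) 1) <<< (2 * i))) ((r : Nat) : Int) L
      = ((List.foldl (fun (r : Nat) (i : Nat) => r ||| (((v >>> i) &&& 1) <<< (2 * i))) r L : Nat) : Int) := by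
  intro L
  induction L with
  | nil => intro r; rfl
  | cons a L ih =>
    intro r
    simp only [List.foldl_cons]
    rw [step_cast, ih]

theorem interleave_alt_eq (n : Int) :
    interleave_alt n = ((loopN (PySem.Int.band n 65535).toNat : Nat) : Int) := by
  have hb := band_mask_bounds n
  have hcast : PySem.Int.band n 65535 = ((PySem.Int.band n 65535).toNat : Int) :=
    (Int.toNat_of_nonneg hb.1).symm
  unfold interleave_alt
  rw [hcast]
  show List.foldl (fun (r : Int) (i : Nat) =>
      PySem.Int.bor r ((PySem.Int.band ((((PySem.Int.band n 65535).toNat : Nat) : Int) >>> i) 1)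
        <<< (2 * i))) (((0 : Nat) : Int)) (List.range 16)
    = ((loopN (PySem.Int.band n 65535).toNat : Nat) : Int)
  rw [foldl_cast]
  rfl

theorem interleave_eq (n : Int) : interleave_bits n = interleave_alt n := by
  rw [interleave_A_eq, interleave_alt_eq, magic_eq_loop]
  have hb := band_mask_bounds n
  omega

theorem morton_eq (p : Int × Int × Int × Int) :
    morton_code (p.1 + PySem.Int.floordiv p.2.2.1 2) (p.2.1 + PySem.Int.floordiv p.2.2.2 2)
      = morton_key_alt p := by
  unfold morton_code morton_key_alt
  rw [interleave_eq, interleave_eq]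

theorem foldl_decorate {α β : Type} (f : α → β) :
    ∀ (l : List α) (acc : List β),
      l.foldl (fun acc p => acc ++ [f p]) acc = acc ++ l.map f := by
  intro l
  induction l with
  | nil => intro acc; simp
  | cons a l ih => intro acc; simp [ih]

theorem mapfst_insertBy {α : Type} (key : α → Int) (x : α) :
    ∀ (ys : List (α × Int)), (∀ q ∈ ys, q.2 = key q.1) →
      (PySem.List.insertBy (fun a b => decide (a.2 < b.2)) (x, key x) ys).map Prod.fst
        = PySem.List.insertBy (fun a b => decide (key a < key b)) x (ys.map Prod.fst) := by
  intro ys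
  induction ys with
  | nil => intro _; simp [PySem.List.insertBy]
  | cons y ys ih =>
    intro h
    have hy : y.2 = key y.1 := h y List.mem_cons_self
    simp only [PySem.List.insertBy, hy]
    by_cases hcmp : key x < key y.1
    · simp [PySem.List.insertBy, hcmp]
    · simp [PySem.List.insertBy, hcmp, ih (fun q hq => h q (List.mem_cons_of_mem _ hq))]

theorem dsu_fold {α : Type} (key : α → Int) :
    ∀ (l : List α) (acc : List (α × Int)), (∀ q ∈ acc, q.2 = key q.1) →
      ((l.map (fun p => (p, key p))).foldl
          (fun acc x => PySem.List.insertBy (fun a b => decide (a.2 < b.2)) x acc) acc).map Prod.fst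
        = l.foldl (fun acc x => PySem.List.insertBy (fun a b => decide (key a < key b)) x acc)
            (acc.map Prod.fst) := by
  intro l
  induction l with
  | nil => intro acc _; rfl
  | cons p l ih =>
    intro acc h
    simp only [List.map_cons, List.foldl_cons]
    rw [ih _ (fun q hq => by
          rcases (PySem.List.mem_insertBy _ _ _ _).mp hq with h1 | h1
          · rw [h1]
          · exact h q h1),
      mapfst_insertBy key p acc h]

theorem dsu_sorted {α : Type} (key : α → Int) (l : List α) :
    (PySem.List.sorted (l.map (fun p => (p, key p))) (fun item => item.2) false).map Prod.fst
      = PySem.List.sorted l key false := by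
  rw [PySem.List.sorted_eq_foldl_insertBy, PySem.List.sorted_eq_foldl_insertBy]
  exact dsu_fold key l [] (by simp)

-- ===== VERDICT (by name: the statement is the Claim_ definition above) =====
theorem sort_patches_by_morton_spec : Claim_equal_sort_patches_by_morton := by
  intro patches _
  unfold Spec_sort_patches_by_morton sort_patches_by_morton sort_patches_by_morton_alt
  have hkey : (fun p : Int × Int × Int × Int =>
      (p, morton_code (p.1 + PySem.Int.floordiv p.2.2.1 2) (p.2.1 + PySem.Int.floordiv p.2.2.2 2)))
      = fun p => (p, morton_key_alt p) := funext (fun p => by rw [morton_eq])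
  rw [foldl_decorate (fun p : Int × Int × Int × Int =>
      (p, morton_code (p.1 + PySem.Int.floordiv p.2.2.1 2) (p.2.1 + PySem.Int.floordiv p.2.2.2 2)))
      patches [], hkey]
  simp only [List.nil_append]
  rw [show (fun item : (Int × Int × Int × Int) × Int => item.1)
        = (Prod.fst : (Int × Int × Int × Int) × Int → Int × Int × Int × Int) from rfl]
  exact dsu_sorted morton_key_alt patches
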